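-- pv_equiv track=rewrite | github.com/qweasads/algorithms_practicum | fibonacci/fib_big_even_odd.py | fib_eo
-- ===== SOURCE A (Python) =====
-- def fib_eo(n):
--
--     if n == 0:
--         return "even"
--     elif n == 1:
--         return "odd"
--
--     a, b = 0, 1
--
--     for _ in range(2, n + 1):
--         a, b = b, (a + b) % 10
--
--     return "even" if b % 2 == 0 else "odd"
-- ===== SOURCE B (Python) =====
-- def fib_eo(n):
--     # Fibonacci parity has period 3: F(n) is even exactly when n % 3 == 0
--     # (true also for the negafibonacci extension to negative n).
--     return "even" if n % 3 == 0 else "odd"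
-- ===== Notes on version B (the rewrite author's own statement) =====
-- stated objective: faster
-- what changed: Replaces the O(n) last-digit iteration with the closed-form parity rule: Fibonacci numbers are even exactly when the index is a multiple of 3.
-- intended difference: For negative n that are multiples of 3 (n = -3, -6, ...) A returns 'odd' (leftover loop state b=1, the loop never runs), while B returns 'even', which is the correct parity of the negafibonacci numbers F(-3)=2, F(-6)=-8, ... — e.g. on fib_eo(-3): A returns "odd", B returns "even"
import Mathlib
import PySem

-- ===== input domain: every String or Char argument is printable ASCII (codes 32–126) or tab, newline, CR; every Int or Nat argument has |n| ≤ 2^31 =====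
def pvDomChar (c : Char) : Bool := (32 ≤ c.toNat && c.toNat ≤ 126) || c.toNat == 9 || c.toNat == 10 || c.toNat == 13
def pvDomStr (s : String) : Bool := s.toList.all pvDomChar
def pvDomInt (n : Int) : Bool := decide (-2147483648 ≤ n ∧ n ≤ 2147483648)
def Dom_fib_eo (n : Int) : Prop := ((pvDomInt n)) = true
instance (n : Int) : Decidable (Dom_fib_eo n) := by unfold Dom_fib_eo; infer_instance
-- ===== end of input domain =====

-- B replaces A's O(n) last-digit loop by the O(1) period-3 parity rule; on negative
-- multiples of 3 A's "odd" is leftover loop state and B returns the intended "even".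

-- ===== PORT A =====
-- A's loop body: a, b = b, (a + b) % 10
def pvStep (s : Int × Int) : Int × Int := (s.2, PySem.Int.mod (s.1 + s.2) 10)

def fib_eo (n : Int) : String :=
  if n == 0 then "even"
  else if n == 1 then "odd"
  else
    -- a, b = 0, 1; for _ in range(2, n+1): a, b = b, (a+b) % 10
    let p := (PySem.List.pyRange 2 (n+1) 1).foldl (fun s _ => pvStep s) (0, 1)
    if PySem.Int.mod p.2 2 == 0 then "even" else "odd"

-- ===== PORT B =====
def fib_eo_alt (n : Int) : String :=
  if PySem.Int.mod n 3 == 0 then "even" else "odd"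

-- ===== PRECONDITION & SPEC =====
-- On negative multiples of 3, A returns "odd" (its loop never runs and the initial b=1
-- leaks out), while B returns "even", the correct parity of F(-3)=2, F(-6)=-8, ….
def D_fib_eo (n : Int) : Prop := n < 0 ∧ PySem.Int.mod n 3 = 0
instance (n : Int) : Decidable (D_fib_eo n) := by unfold D_fib_eo; infer_instance
def Spec_fib_eo (n : Int) (out : String) : Prop := ¬ D_fib_eo n → out = fib_eo_alt n
instance (n : Int) (out : String) : Decidable (Spec_fib_eo n out) := by unfold Spec_fib_eo; infer_instance
def pvDiffWitness_fib_eo : Int := (-3)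
def pvDiffWitnessOut_fib_eo : String × String := ("odd", "even")

-- ===== CLAIM (what is proved, stated in full; the proofs are below) =====
def Claim_unchanged_fib_eo : Prop := ∀ (n : Int), Dom_fib_eo n → Spec_fib_eo n (fib_eo n)
def Claim_changed_fib_eo : Prop := Dom_fib_eo (pvDiffWitness_fib_eo) ∧ D_fib_eo (pvDiffWitness_fib_eo) ∧ fib_eo (pvDiffWitness_fib_eo) = pvDiffWitnessOut_fib_eo.1 ∧ fib_eo_alt (pvDiffWitness_fib_eo) = pvDiffWitnessOut_fib_eo.2 ∧ pvDiffWitnessOut_fib_eo.1 ≠ pvDiffWitnessOut_fib_eo.2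
def Claim_exact_fib_eo : Prop := ∀ (n : Int), Dom_fib_eo n → D_fib_eo n → fib_eo n ≠ fib_eo_alt n

-- ===== LEMMAS AND PROOFS =====

-- a foldl that ignores the list elements is function iteration on the length
theorem pv_foldl_const {α β : Type} (f : β → β) (l : List α) (init : β) :
    l.foldl (fun s _ => f s) init = f^[l.length] init := by
  induction l generalizing init with
  | nil => rfl
  | cons a t ih => simp [List.foldl, ih, Function.iterate_succ_apply]

-- parity pattern with period 3
def pvPm (m : Nat) : Int := if m % 3 = 0 then 0 else 1

theorem pv_iter_parity (k : Nat) :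
    (pvStep^[k] ((0 : Int), (1 : Int))).1 % 2 = pvPm k ∧
    (pvStep^[k] ((0 : Int), (1 : Int))).2 % 2 = pvPm (k + 1) := by
  induction k with
  | zero => simp [pvPm]
  | succ k ih =>
    obtain ⟨h1, h2⟩ := ih
    rw [Function.iterate_succ_apply']
    set s := pvStep^[k] ((0 : Int), (1 : Int)) with hs
    constructor
    · simpa [pvStep] using h2
    · show PySem.Int.mod (s.1 + s.2) 10 % 2 = pvPm (k + 2)
      rw [PySem.Int.mod_eq_emod_of_pos (by norm_num)]
      rw [Int.emod_emod_of_dvd _ (by norm_num : (2:Int) ∣ 10)]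
      have : (s.1 + s.2) % 2 = (s.1 % 2 + s.2 % 2) % 2 := by omega
      rw [this, h1, h2]
      unfold pvPm
      have h3 : (k + 2) % 3 = 0 ↔ ¬ (k % 3 = 0) ∧ ¬ ((k + 1) % 3 = 0) := by omega
      split_ifs with a b c d e <;> omega

theorem pv_fib_eo_of_ge_two (n : Int) (hn : 2 ≤ n) : fib_eo n = fib_eo_alt n := by
  have h0 : (n == 0) = false := by simp; omega
  have h1 : (n == 1) = false := by simp; omega
  unfold fib_eo
  rw [h0, h1]
  simp only [Bool.false_eq_true, if_false]
  rw [pv_foldl_const pvStep, PySem.List.length_pyRange_one]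
  have hlen : (n + 1 - 2).toNat = (n - 1).toNat := by omega
  rw [hlen]
  have hpar := (pv_iter_parity ((n - 1).toNat)).2
  have hk : ((n - 1).toNat : Int) = n - 1 := by omega
  unfold fib_eo_alt
  rw [PySem.Int.mod_eq_emod_of_pos (by norm_num : (0:Int) < 2),
      PySem.Int.mod_eq_emod_of_pos (by norm_num : (0:Int) < 3)]
  unfold pvPm at hpar
  have hidx : (n - 1).toNat = n.toNat - 1 := by omega
  rw [hidx] at hpar
  by_cases h3 : n % 3 = 0
  · have : (n.toNat - 1 + 1) % 3 = 0 := by omega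
    rw [if_pos this] at hpar
    simp [h3]
    omega
  · have : ¬ (n.toNat - 1 + 1) % 3 = 0 := by omega
    rw [if_neg this] at hpar
    simp [h3]
    omega

theorem pv_fib_eo_neg (n : Int) (hn : n < 0) : fib_eo n = "odd" := by
  have h0 : (n == 0) = false := by simp; omega
  have h1 : (n == 1) = false := by simp; omega
  unfold fib_eo
  rw [h0, h1]
  simp only [Bool.false_eq_true, if_false]
  rw [PySem.List.pyRange_one_eq_nil (by omega : n + 1 ≤ 2)]
  decide

-- ===== VERDICT (by name: the statement is the Claim_ definition above) =====
theorem fib_eo_spec : Claim_unchanged_fib_eo := by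
  intro n _ hD
  rcases lt_trichotomy n 0 with hneg | hz | hpos
  · -- n < 0 and not a multiple of 3 (else D_ holds)
    have h3 : ¬ PySem.Int.mod n 3 = 0 := fun h => hD ⟨hneg, h⟩
    rw [pv_fib_eo_neg n hneg]
    have hc : (PySem.Int.mod n 3 == 0) = false := beq_eq_false_iff_ne.mpr h3
    simp only [fib_eo_alt, hc, Bool.false_eq_true, if_false]
  · subst hz; decide
  · rcases (by omega : n = 1 ∨ 2 ≤ n) with h | h
    · subst h; decide
    · exact pv_fib_eo_of_ge_two n h

theorem fib_eo_changed : Claim_changed_fib_eo := by unfold Claim_changed_fib_eo; decide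

theorem fib_eo_tight : Claim_exact_fib_eo := by
  intro n _ hD
  rw [pv_fib_eo_neg n hD.1]
  have hc : (PySem.Int.mod n 3 == 0) = true := beq_iff_eq.mpr hD.2
  simp only [fib_eo_alt, hc, if_true]
  decide
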